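-- pv_equiv track=rewrite | github.com/navya099/test | DeCATSBVE/utils/comom_util.py | generate_postnumbers
-- ===== SOURCE A (Python) =====
-- def generate_postnumbers(lst):
--     postnumbers = []
--     prev_km = -1
--     count = 0
--
--     for number in lst:
--         km = number // 1000  # 1000으로 나눈 몫이 같은 구간
--         if km == prev_km:
--             count += 1  # 같은 구간에서 숫자 증가
--         else:
--             prev_km = km
--             count = 1  # 새로운 구간이므로 count를 0으로 초기화
--
--         postnumbers.append((number, f'{km}-{count}'))
--
--     return postnumbers
-- ===== SOURCE B (Python) =====
-- def generate_postnumbers(lst):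
--     n = len(lst)
--     kms = [x // 1000 for x in lst]
--     cuts = [i for i in range(n) if i == 0 or kms[i] != kms[i - 1]] + [n]
--     return [(lst[j], f'{kms[s]}-{j - s + 1}')
--             for s, e in zip(cuts, cuts[1:])
--             for j in range(s, e)]
-- ===== Notes on version B (the rewrite author's own statement) =====
-- stated objective: alternative
-- what changed: Replaces A's single-pass prev_km/count state machine with three staged passes: a km map, a boundary-index pass finding run starts by adjacent comparison, and arithmetic labelling j - s + 1 over the cut segments (no running counter).
import Mathlib
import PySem

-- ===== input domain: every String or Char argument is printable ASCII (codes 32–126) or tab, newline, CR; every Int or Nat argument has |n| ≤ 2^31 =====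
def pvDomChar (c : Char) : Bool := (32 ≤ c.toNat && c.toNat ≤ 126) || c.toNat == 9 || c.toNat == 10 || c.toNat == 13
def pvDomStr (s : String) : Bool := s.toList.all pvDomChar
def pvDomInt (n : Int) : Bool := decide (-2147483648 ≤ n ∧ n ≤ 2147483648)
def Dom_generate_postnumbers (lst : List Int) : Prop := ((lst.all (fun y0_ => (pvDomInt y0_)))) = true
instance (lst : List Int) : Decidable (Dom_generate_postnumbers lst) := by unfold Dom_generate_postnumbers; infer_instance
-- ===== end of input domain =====

-- B replaces A's running prev_km/count state machine by three staged passes: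
-- a km map, a boundary-index pass (run starts found by adjacent comparison), and
-- arithmetic labelling j - s + 1 over the cut segments (objective: alternative).

-- ===== PORT A =====
-- state = (postnumbers, prev_km, count), exactly A's three loop variables
def generate_postnumbers (lst : List Int) : List (Int × String) :=
  (lst.foldl
    (fun (st : List (Int × String) × Int × Int) number =>
      let km := PySem.Int.floordiv number 1000
      if km = st.2.1 then
        (st.1 ++ [(number, PySem.Int.toStr km ++ "-" ++ PySem.Int.toStr (st.2.2 + 1))],
         st.2.1, st.2.2 + 1)
      else
        (st.1 ++ [(number, PySem.Int.toStr km ++ "-" ++ PySem.Int.toStr 1)],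
         km, (1 : Int)))
    ([], -1, 0)).1

-- ===== PORT B =====
-- All list indexing in Source B is by indices produced by range(n)/range(s,e) and is
-- always in range in Python, so kms[i], kms[i-1] (guarded by `i == 0 or`, short-
-- circuited here too by ||), kms[s] and lst[j] are ported with pyGetD (exact here).
def generate_postnumbers_alt (lst : List Int) : List (Int × String) :=
  let n : Int := lst.length
  let kms := lst.map (fun x => PySem.Int.floordiv x 1000)
  let cuts := ((PySem.List.pyRange 0 n 1).filter
      (fun i => i == 0 || !(PySem.List.pyGetD kms i 0 == PySem.List.pyGetD kms (i - 1) 0))) ++ [n]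
  (cuts.zip (PySem.List.slice cuts (some 1) none)).flatMap (fun se =>
    (PySem.List.pyRange se.1 se.2 1).map (fun j =>
      (PySem.List.pyGetD lst j 0,
       PySem.Int.toStr (PySem.List.pyGetD kms se.1 0) ++ "-" ++ PySem.Int.toStr (j - se.1 + 1))))

-- ===== PRECONDITION & SPEC =====
def Spec_generate_postnumbers (lst : List Int) (out : List (Int × String)) : Prop := out = generate_postnumbers_alt lst
instance (lst : List Int) (out : List (Int × String)) : Decidable (Spec_generate_postnumbers lst out) := by unfold Spec_generate_postnumbers; infer_instance

-- ===== CLAIM (what is proved, stated in full; the proofs are below) =====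
def Claim_equal_generate_postnumbers : Prop := ∀ (lst : List Int), Dom_generate_postnumbers lst → Spec_generate_postnumbers lst (generate_postnumbers lst)

-- ===== LEMMAS AND PROOFS =====

-- A's loop body, named for the proofs
def pvStep (st : List (Int × String) × Int × Int) (number : Int) :
    List (Int × String) × Int × Int :=
  let km := PySem.Int.floordiv number 1000
  if km = st.2.1 then
    (st.1 ++ [(number, PySem.Int.toStr km ++ "-" ++ PySem.Int.toStr (st.2.2 + 1))],
     st.2.1, st.2.2 + 1)
  else
    (st.1 ++ [(number, PySem.Int.toStr km ++ "-" ++ PySem.Int.toStr 1)],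
     km, (1 : Int))

-- the maximal prefix of xs whose km equals `km`, and the remainder
def pvGroupRun (km : Int) : List Int → List Int × List Int
  | [] => ([], [])
  | n :: rest =>
    if PySem.Int.floordiv n 1000 = km then
      let p := pvGroupRun km rest
      (n :: p.1, p.2)
    else ([], n :: rest)

theorem pvGroupRun_len (km : Int) (l : List Int) : (pvGroupRun km l).2.length ≤ l.length := by
  induction l with
  | nil => simp [pvGroupRun]
  | cons n rest ih =>
    simp only [pvGroupRun]
    split
    · simpa using Nat.le_succ_of_le ih
    · simp

-- the list as (key, members) runs of equal km
def pvGroups : List Int → List (Int × List Int)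
  | [] => []
  | n :: rest =>
    let km := PySem.Int.floordiv n 1000
    let p := pvGroupRun km rest
    (km, n :: p.1) :: pvGroups p.2
termination_by l => l.length
decreasing_by
  simpa using Nat.lt_succ_of_le (pvGroupRun_len (PySem.Int.floordiv n 1000) rest)

-- label each member of a run with its running count
def pvNumberGroup (km : Int) (c : Int) : List Int → List (Int × String)
  | [] => []
  | n :: rest =>
    (n, PySem.Int.toStr km ++ "-" ++ PySem.Int.toStr c) :: pvNumberGroup km (c + 1) rest

theorem pvGroupRun_spec (km : Int) (l : List Int) :
    (pvGroupRun km l).1 ++ (pvGroupRun km l).2 = l ∧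
    (∀ x ∈ (pvGroupRun km l).1, PySem.Int.floordiv x 1000 = km) ∧
    (∀ y ∈ (pvGroupRun km l).2.head?, PySem.Int.floordiv y 1000 ≠ km) := by
  induction l with
  | nil => simp [pvGroupRun]
  | cons n rest ih =>
    simp only [pvGroupRun]
    split
    next h =>
      refine ⟨by simp [ih.1], ?_, ih.2.2⟩
      intro x hx
      rcases List.mem_cons.mp hx with rfl | hx
      · exact h
      · exact ih.2.1 x hx
    next h => exact ⟨rfl, by simp, by simpa using h⟩

-- ---------- A-side: the fold equals the groups decomposition ----------

theorem pvFold_run (km : Int) (g : List Int) (hg : ∀ x ∈ g, PySem.Int.floordiv x 1000 = km) :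
    ∀ (r : List Int) (acc : List (Int × String)) (c : Int),
      (g ++ r).foldl pvStep (acc, km, c) =
        r.foldl pvStep (acc ++ pvNumberGroup km (c + 1) g, km, c + g.length) := by
  induction g with
  | nil => intro r acc c; simp [pvNumberGroup]
  | cons n g' ih =>
    intro r acc c
    have hn : PySem.Int.floordiv n 1000 = km := hg n (List.mem_cons_self ..)
    have hg' : ∀ x ∈ g', PySem.Int.floordiv x 1000 = km := fun x hx => hg x (List.mem_cons_of_mem _ hx)
    simp only [List.cons_append, List.foldl_cons, pvStep, hn, if_true]
    rw [ih hg' r _ (c + 1)]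
    simp only [pvNumberGroup, List.length_cons]
    have harith : c + 1 + (g'.length : Int) = c + ((g'.length + 1 : Nat) : Int) := by
      push_cast; ring
    rw [List.append_assoc, List.singleton_append, harith]

theorem pvFold_groups (N : Nat) :
    ∀ (lst : List Int), lst.length ≤ N →
      ∀ (acc : List (Int × String)) (prev c : Int),
        (lst = [] ∨ (∀ y ∈ lst.head?, PySem.Int.floordiv y 1000 ≠ prev) ∨ c = 0) →
        (lst.foldl pvStep (acc, prev, c)).1 =
          acc ++ (pvGroups lst).flatMap (fun g => pvNumberGroup g.1 1 g.2) := by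
  induction N with
  | zero =>
    intro lst hlen acc prev c _
    have : lst = [] := List.eq_nil_of_length_eq_zero (Nat.le_zero.mp hlen)
    subst this; simp [pvGroups]
  | succ N ih =>
    intro lst hlen acc prev c hfresh
    cases lst with
    | nil => simp [pvGroups]
    | cons n rest =>
      set km := PySem.Int.floordiv n 1000 with hkm
      obtain ⟨hsp, hall, hhd⟩ := pvGroupRun_spec km rest
      have hstep : pvStep (acc, prev, c) n =
          (acc ++ [(n, PySem.Int.toStr km ++ "-" ++ PySem.Int.toStr 1)], km, (1 : Int)) := by
        simp only [pvStep, ← hkm]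
        by_cases h : km = prev
        · rcases hfresh with h0 | h0 | h0
          · simp at h0
          · exact absurd h (by rw [hkm]; exact h0 n rfl)
          · subst h0
            rw [if_pos h, ← h]
            norm_num
        · rw [if_neg h]
      have hrest : rest = (pvGroupRun km rest).1 ++ (pvGroupRun km rest).2 := hsp.symm
      have hlen2 : (pvGroupRun km rest).2.length ≤ N := by
        have := pvGroupRun_len km rest
        simp only [List.length_cons] at hlen
        omega
      calc ((n :: rest).foldl pvStep (acc, prev, c)).1
          = (rest.foldl pvStep (acc ++ [(n, PySem.Int.toStr km ++ "-" ++ PySem.Int.toStr 1)], km, 1)).1 := by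
            rw [List.foldl_cons, hstep]
        _ = (((pvGroupRun km rest).1 ++ (pvGroupRun km rest).2).foldl pvStep
              (acc ++ [(n, PySem.Int.toStr km ++ "-" ++ PySem.Int.toStr 1)], km, 1)).1 := by
            rw [← hrest]
        _ = ((pvGroupRun km rest).2.foldl pvStep
              (acc ++ [(n, PySem.Int.toStr km ++ "-" ++ PySem.Int.toStr 1)]
                   ++ pvNumberGroup km 2 (pvGroupRun km rest).1,
               km, 1 + (pvGroupRun km rest).1.length)).1 := by
            rw [pvFold_run km _ hall _ _ 1]
            norm_num
        _ = acc ++ [(n, PySem.Int.toStr km ++ "-" ++ PySem.Int.toStr 1)]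
              ++ pvNumberGroup km 2 (pvGroupRun km rest).1
              ++ (pvGroups (pvGroupRun km rest).2).flatMap (fun g => pvNumberGroup g.1 1 g.2) := by
            rw [ih _ hlen2]
            right; left; exact hhd
        _ = acc ++ (pvGroups (n :: rest)).flatMap (fun g => pvNumberGroup g.1 1 g.2) := by
            conv_rhs => rw [pvGroups]
            rw [← hkm]
            simp only [List.flatMap_cons, pvNumberGroup, List.append_assoc,
              List.cons_append]
            norm_num

-- ---------- B-side: named copies of the port's three stages ----------

def pvKms (l : List Int) : List Int := l.map (fun x => PySem.Int.floordiv x 1000)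

def pvCuts (l : List Int) : List Int :=
  ((PySem.List.pyRange 0 (l.length : Int) 1).filter
      (fun i => i == 0 || !(PySem.List.pyGetD (pvKms l) i 0 == PySem.List.pyGetD (pvKms l) (i - 1) 0))) ++ [(l.length : Int)]

def pvSeg (l : List Int) (se : Int × Int) : List (Int × String) :=
  (PySem.List.pyRange se.1 se.2 1).map (fun j =>
    (PySem.List.pyGetD l j 0,
     PySem.Int.toStr (PySem.List.pyGetD (pvKms l) se.1 0) ++ "-" ++ PySem.Int.toStr (j - se.1 + 1)))

theorem pvAlt_eq (l : List Int) :
    generate_postnumbers_alt l = ((pvCuts l).zip ((pvCuts l).tail)).flatMap (pvSeg l) := by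
  simp only [generate_postnumbers_alt, pvCuts, pvKms, PySem.List.slice_from_one]
  rfl

-- ---------- small indexing lemmas ----------

theorem pvGetD_append_right (a b : List Int) (j : Int) (hj : 0 ≤ j) (d : Int) :
    PySem.List.pyGetD (a ++ b) ((a.length : Int) + j) d = PySem.List.pyGetD b j d := by
  rw [PySem.List.pyGetD_of_nonneg _ _ (by omega), PySem.List.pyGetD_of_nonneg _ _ hj]
  have h1 : ((a.length : Int) + j).toNat = a.length + j.toNat := by omega
  rw [h1, List.getD_eq_getElem?_getD, List.getD_eq_getElem?_getD,
    List.getElem?_append_right (by omega)]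
  have h2 : a.length + j.toNat - a.length = j.toNat := by omega
  rw [h2]

theorem pvGetD_append_left (a b : List Int) (i : Int) (h0 : 0 ≤ i) (h1 : i < (a.length : Int)) (d : Int) :
    PySem.List.pyGetD (a ++ b) i d = a[i.toNat]'(by omega) := by
  rw [PySem.List.pyGetD_eq_getElem (a ++ b) d h0 (by simp; omega)]
  exact List.getElem_append_left (by omega)

-- the km map of a prefix run is constant
theorem pvKms_const (g r : List Int) (k : Int)
    (hg : ∀ x ∈ g, PySem.Int.floordiv x 1000 = k) (i : Int) (h0 : 0 ≤ i) (h1 : i < (g.length : Int)) :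
    PySem.List.pyGetD (pvKms (g ++ r)) i 0 = k := by
  have : pvKms (g ++ r) = pvKms g ++ pvKms r := by simp [pvKms]
  rw [this, pvGetD_append_left _ _ i h0 (by simp [pvKms]; omega)]
  have hm : (pvKms g)[i.toNat]'(by simp [pvKms]; omega) = PySem.Int.floordiv (g[i.toNat]'(by omega)) 1000 := by
    simp [pvKms]
  rw [hm]
  exact hg _ (List.getElem_mem _)

theorem pvKms_append_right (g r : List Int) (j : Int) (hj : 0 ≤ j) :
    PySem.List.pyGetD (pvKms (g ++ r)) ((g.length : Int) + j) 0 = PySem.List.pyGetD (pvKms r) j 0 := by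
  have : pvKms (g ++ r) = pvKms g ++ pvKms r := by simp [pvKms]
  rw [this]
  have hl : ((pvKms g).length : Int) = (g.length : Int) := by simp [pvKms]
  rw [← hl]
  exact pvGetD_append_right _ _ j hj 0

-- a shifted range is the mapped range
theorem pvRange_shift (s e L : Int) :
    PySem.List.pyRange (s + L) (e + L) 1 = (PySem.List.pyRange s e 1).map (fun t => t + L) := by
  rw [PySem.List.pyRange_one, PySem.List.pyRange_one]
  have h : e + L - (s + L) = e - s := by ring
  rw [h, List.map_map]
  apply List.map_congr_left
  intro a _
  simp
  ring

-- every cut is nonnegative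
theorem pvCuts_nonneg (l : List Int) : ∀ x ∈ pvCuts l, 0 ≤ x := by
  intro x hx
  rcases List.mem_append.mp hx with h | h
  · have := PySem.List.mem_pyRange_one.mp (List.mem_of_mem_filter h)
    omega
  · simp at h
    omega

-- cuts always start with 0
theorem pvCuts_head (l : List Int) : ∃ c', pvCuts l = 0 :: c' := by
  cases l with
  | nil => exact ⟨[], by simp [pvCuts, pvKms, PySem.List.pyRange_one_eq_nil]⟩
  | cons x xs =>
    refine ⟨((PySem.List.pyRange 1 (((x :: xs).length : Nat) : Int) 1).filter
        (fun i => i == 0 || !(PySem.List.pyGetD (pvKms (x :: xs)) i 0 == PySem.List.pyGetD (pvKms (x :: xs)) (i - 1) 0))) ++ [(((x :: xs).length : Nat) : Int)], ?_⟩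
    unfold pvCuts
    rw [PySem.List.pyRange_one_cons (by simp), List.filter_cons_of_pos (by simp),
      show (0 : Int) + 1 = 1 by norm_num]
    simp

-- the central decomposition: cuts of (g ++ r) = 0 :: (cuts of r shifted by |g|)
theorem pvCuts_append (g r : List Int) (k : Int) (hne : g ≠ [])
    (hg : ∀ x ∈ g, PySem.Int.floordiv x 1000 = k)
    (hr : ∀ y ∈ r.head?, PySem.Int.floordiv y 1000 ≠ k) :
    pvCuts (g ++ r) = 0 :: (pvCuts r).map (fun t => t + (g.length : Int)) := by
  have hL : 1 ≤ (g.length : Int) := by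
    cases g with
    | nil => exact absurd rfl hne
    | cons _ _ => simp
  set L : Int := (g.length : Int) with hLdef
  set M : Int := (r.length : Int) with hMdef
  have hM0 : 0 ≤ M := by simp [hMdef]
  have hn : ((g ++ r).length : Int) = L + M := by simp [hLdef, hMdef]
  unfold pvCuts
  rw [hn]
  rw [PySem.List.pyRange_one_append 0 L (L + M) (by omega) (by omega), List.filter_append]
  -- first block: only i = 0 survives
  have h1 : (PySem.List.pyRange 0 L 1).filter
      (fun i => i == 0 || !(PySem.List.pyGetD (pvKms (g ++ r)) i 0 == PySem.List.pyGetD (pvKms (g ++ r)) (i - 1) 0)) = [0] := by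
    rw [PySem.List.pyRange_one_cons (by omega), List.filter_cons_of_pos (by simp)]
    have : (PySem.List.pyRange 1 L 1).filter
        (fun i => i == 0 || !(PySem.List.pyGetD (pvKms (g ++ r)) i 0 == PySem.List.pyGetD (pvKms (g ++ r)) (i - 1) 0)) = [] := by
      rw [List.filter_eq_nil_iff]
      intro i hi
      have hib := PySem.List.mem_pyRange_one.mp hi
      have e1 : PySem.List.pyGetD (pvKms (g ++ r)) i 0 = k := pvKms_const g r k hg i (by omega) (by omega)
      have e2 : PySem.List.pyGetD (pvKms (g ++ r)) (i - 1) 0 = k := pvKms_const g r k hg (i - 1) (by omega) (by omega)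
      simp [e1, e2]
      omega
    rw [show (0 : Int) + 1 = 1 by norm_num, this]
  rw [h1]
  -- second block: shifted boundaries of r
  have h2 : PySem.List.pyRange L (L + M) 1 = (PySem.List.pyRange 0 M 1).map (fun t => t + L) := by
    have h := pvRange_shift 0 M L
    rw [show L + M = M + L by ring]
    simpa using h
  have h3 : (PySem.List.pyRange L (L + M) 1).filter
      (fun i => i == 0 || !(PySem.List.pyGetD (pvKms (g ++ r)) i 0 == PySem.List.pyGetD (pvKms (g ++ r)) (i - 1) 0)) =
      ((PySem.List.pyRange 0 M 1).filter
        (fun t => t == 0 || !(PySem.List.pyGetD (pvKms r) t 0 == PySem.List.pyGetD (pvKms r) (t - 1) 0))).map (fun t => t + L) := by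
    rw [h2, List.filter_map]
    congr 1
    apply List.filter_congr
    intro t ht
    have htb := PySem.List.mem_pyRange_one.mp ht
    simp only [Function.comp]
    by_cases ht0 : t = 0
    · subst ht0
      -- boundary at the junction: km changes there (r nonempty since 0 < M)
      have hrne : r ≠ [] := by
        cases r with
        | nil => simp [hMdef] at htb
        | cons _ _ => simp
      obtain ⟨y, r', rfl⟩ := List.exists_cons_of_ne_nil hrne
      have hy : PySem.Int.floordiv y 1000 ≠ k := hr y (by simp)
      have e1 : PySem.List.pyGetD (pvKms (g ++ y :: r')) (0 + L) 0 = PySem.Int.floordiv y 1000 := by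
        rw [show (0 : Int) + L = L + 0 by ring, pvKms_append_right g _ 0 (by omega)]
        simp [pvKms, PySem.List.pyGetD_of_nonneg]
      have e2 : PySem.List.pyGetD (pvKms (g ++ y :: r')) (0 + L - 1) 0 = k := by
        rw [show (0 : Int) + L - 1 = L - 1 by ring]
        exact pvKms_const g _ k hg (L - 1) (by omega) (by omega)
      simp only [e1, e2]
      simp
      right
      simpa using hy
    · -- interior of r: both predicates compare the same two kms
      have ht1 : 1 ≤ t := by omega
      have e1 : PySem.List.pyGetD (pvKms (g ++ r)) (t + L) 0 = PySem.List.pyGetD (pvKms r) t 0 := by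
        rw [show t + L = L + t by ring]
        exact pvKms_append_right g r t (by omega)
      have e2 : PySem.List.pyGetD (pvKms (g ++ r)) (t + L - 1) 0 = PySem.List.pyGetD (pvKms r) (t - 1) 0 := by
        rw [show t + L - 1 = L + (t - 1) by ring]
        exact pvKms_append_right g r (t - 1) (by omega)
      have hne1 : (t + L == (0 : Int)) = false := by simp; omega
      have hne2 : (t == (0 : Int)) = false := by simp; omega
      rw [hne1, hne2, e1, e2]
  rw [h3]
  simp [List.map_append, add_comm, hMdef, hLdef]

-- labelling one run by index arithmetic equals pvNumberGroup
theorem pvSeg_run_core (l : List Int) (K s0 : Int) :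
    ∀ (g : List Int) (s : Int), 0 ≤ s → s0 ≤ s →
      (∀ (t : Nat) (ht : t < g.length), PySem.List.pyGetD l (s + (t : Int)) 0 = g[t]) →
      (PySem.List.pyRange s (s + (g.length : Int)) 1).map (fun j =>
          (PySem.List.pyGetD l j 0,
           PySem.Int.toStr K ++ "-" ++ PySem.Int.toStr (j - s0 + 1))) =
        pvNumberGroup K (s - s0 + 1) g := by
  intro g
  induction g with
  | nil => intro s _ _ _; simp [PySem.List.pyRange_one_eq_nil, pvNumberGroup]
  | cons x g' ih =>
    intro s hs0 hss h
    rw [PySem.List.pyRange_one_cons (by simp), List.map_cons]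
    have hx : PySem.List.pyGetD l s 0 = x := by
      have := h 0 (by simp)
      simpa using this
    have hrec := ih (s + 1) (by omega) (by omega) (fun t ht => by
      have h2 := h (t + 1) (by simpa using Nat.succ_lt_succ ht)
      rw [show s + ((t + 1 : Nat) : Int) = s + 1 + (t : Int) by push_cast; ring] at h2
      simpa using h2)
    have hlen : s + ((x :: g').length : Int) = s + 1 + (g'.length : Int) := by
      simp; ring
    rw [hlen, hrec]
    simp only [pvNumberGroup, hx]
    congr 2
    omega

-- the first segment (0, |g|) of g ++ r is the numbered run g
theorem pvSeg_first (g r : List Int) (k : Int) (hne : g ≠ [])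
    (hg : ∀ x ∈ g, PySem.Int.floordiv x 1000 = k) :
    pvSeg (g ++ r) (0, (g.length : Int)) = pvNumberGroup k 1 g := by
  unfold pvSeg
  have hk0 : PySem.List.pyGetD (pvKms (g ++ r)) 0 0 = k := by
    apply pvKms_const g r k hg 0 le_rfl
    cases g with
    | nil => exact absurd rfl hne
    | cons _ _ => simp
  simp only [hk0]
  have := pvSeg_run_core (g ++ r) k 0 g 0 le_rfl le_rfl (fun t ht => by
    have : PySem.List.pyGetD (g ++ r) ((0 : Int) + (t : Int)) 0 = g[t] := by
      rw [show (0 : Int) + (t : Int) = (t : Int) by ring]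
      rw [pvGetD_append_left g r (t : Int) (by omega) (by omega) 0]
      simp
    exact this)
  simpa using this

-- a shifted segment of g ++ r is the corresponding segment of r
theorem pvSeg_shift (g r : List Int) (s e : Int) (hs : 0 ≤ s) :
    pvSeg (g ++ r) (s + (g.length : Int), e + (g.length : Int)) = pvSeg r (s, e) := by
  unfold pvSeg
  simp only
  rw [pvRange_shift s e (g.length : Int), List.map_map]
  apply List.map_congr_left
  intro j hj
  have hjb := PySem.List.mem_pyRange_one.mp hj
  have e1 : PySem.List.pyGetD (g ++ r) (j + (g.length : Int)) 0 = PySem.List.pyGetD r j 0 := by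
    rw [show j + (g.length : Int) = (g.length : Int) + j by ring]
    exact pvGetD_append_right g r j (by omega) 0
  have e2 : PySem.List.pyGetD (pvKms (g ++ r)) (s + (g.length : Int)) 0 = PySem.List.pyGetD (pvKms r) s 0 := by
    rw [show s + (g.length : Int) = (g.length : Int) + s by ring]
    exact pvKms_append_right g r s hs
  simp only [Function.comp, e1, e2]
  congr 3
  ring

-- B's body equals the groups decomposition
theorem pvB_groups (N : Nat) :
    ∀ (lst : List Int), lst.length ≤ N →
      ((pvCuts lst).zip ((pvCuts lst).tail)).flatMap (pvSeg lst) =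
        (pvGroups lst).flatMap (fun g => pvNumberGroup g.1 1 g.2) := by
  induction N with
  | zero =>
    intro lst hlen
    have : lst = [] := List.eq_nil_of_length_eq_zero (Nat.le_zero.mp hlen)
    subst this
    simp [pvCuts, pvKms, PySem.List.pyRange_one_eq_nil, pvGroups]
  | succ N ih =>
    intro lst hlen
    cases lst with
    | nil => simp [pvCuts, pvKms, PySem.List.pyRange_one_eq_nil, pvGroups]
    | cons n rest =>
      set km := PySem.Int.floordiv n 1000 with hkm
      obtain ⟨hsp, hall, hhd⟩ := pvGroupRun_spec km rest
      set g : List Int := n :: (pvGroupRun km rest).1 with hgdef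
      set r : List Int := (pvGroupRun km rest).2 with hrdef
      have hsplit : n :: rest = g ++ r := by
        rw [hgdef, hrdef, List.cons_append, hsp]
      have hgne : g ≠ [] := by simp [hgdef]
      have hgall : ∀ x ∈ g, PySem.Int.floordiv x 1000 = km := by
        intro x hx
        rcases List.mem_cons.mp hx with rfl | hx
        · exact hkm.symm
        · exact hall x hx
      have hlenr : r.length ≤ N := by
        have := pvGroupRun_len km rest
        simp only [List.length_cons] at hlen
        rw [hrdef]
        omega
      rw [hsplit]
      set L : Int := (g.length : Int) with hLdef
      obtain ⟨c', hc'⟩ := pvCuts_head r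
      have hcuts : pvCuts (g ++ r) = 0 :: (pvCuts r).map (fun t => t + L) :=
        pvCuts_append g r km hgne hgall hhd
      rw [hcuts, hc']
      simp only [List.map_cons, List.tail_cons]
      have hzip : ((0 : Int) :: ((0 : Int) + L) :: c'.map (fun t => t + L)).zip
            (((0 : Int) + L) :: c'.map (fun t => t + L)) =
          ((0 : Int), (0 : Int) + L) ::
            ((((0 : Int) :: c').map (fun t => t + L)).zip (c'.map (fun t => t + L))) := by
        simp
      rw [hzip, List.flatMap_cons, List.zip_map, List.flatMap_map]
      have hfirst : pvSeg (g ++ r) (0, 0 + L) = pvNumberGroup km 1 g := by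
        rw [show (0 : Int) + L = L by ring, hLdef]
        exact pvSeg_first g r km hgne hgall
      have hmemseg : ∀ se ∈ (((0 : Int) :: c').zip c'),
          pvSeg (g ++ r) (Prod.map (fun t => t + L) (fun t => t + L) se) = pvSeg r se := by
        intro se hse
        have h1 : se.1 ∈ pvCuts r := by
          rw [hc']
          exact (List.of_mem_zip hse).1
        have hs : 0 ≤ se.1 := pvCuts_nonneg r se.1 h1
        cases se with
        | mk s e =>
          simp only [Prod.map]
          exact pvSeg_shift g r s e hs
      have hrestseg :
          ((((0 : Int) :: c').zip c').flatMap
            (fun se => pvSeg (g ++ r) (Prod.map (fun t => t + L) (fun t => t + L) se))) =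
          ((((0 : Int) :: c').zip c').flatMap (pvSeg r)) := by
        rw [List.flatMap_def, List.flatMap_def, List.map_congr_left hmemseg]
      rw [hfirst, hrestseg]
      have hzc : (((0 : Int) :: c').zip c') = (pvCuts r).zip ((pvCuts r).tail) := by
        rw [hc', List.tail_cons]
      rw [hzc, ih r hlenr]
      -- unfold pvGroups once on the right
      have hRHS : pvGroups (g ++ r) = (km, g) :: pvGroups r := by
        rw [← hsplit]
        rw [pvGroups]
      rw [hRHS, List.flatMap_cons]

-- ===== VERDICT (by name: the statement is the Claim_ definition above) =====
theorem generate_postnumbers_spec : Claim_equal_generate_postnumbers := by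
  intro lst _
  unfold Spec_generate_postnumbers
  rw [pvAlt_eq]
  rw [pvB_groups lst.length lst le_rfl]
  exact pvFold_groups lst.length lst le_rfl [] (-1) 0 (by tauto)
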